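-- pv_equiv track=rewrite | github.com/truonghuutri290802/Python_Tris | bt7.py | sum_of_cubes_odd_number
-- ===== SOURCE A (Python) =====
-- def sum_of_cubes_odd_number(x):
--     s=0
--
--     if x ==1:
--        return (1)
--     elif x== 0:
--        return (0)
--     elif x < 0 :
--        return (-1)
--     else :
--         for i in range(1,2*x-1+1,2):
--            s += i**3
--     a = s %(10**9+7)
--     return a
-- ===== SOURCE B (Python) =====
-- def sum_of_cubes_odd_number(x):
--     if x < 0:
--         return -1
--     if x == 0:
--         return 0
--     return (x * x * (2 * x * x - 1)) % (10**9 + 7)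
-- ===== Notes on version B (the rewrite author's own statement) =====
-- stated objective: faster
-- what changed: Replaced the O(x) loop summing cubes of the first x odd numbers by the closed form x^2*(2*x^2-1) mod 1e9+7.
import Mathlib
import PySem

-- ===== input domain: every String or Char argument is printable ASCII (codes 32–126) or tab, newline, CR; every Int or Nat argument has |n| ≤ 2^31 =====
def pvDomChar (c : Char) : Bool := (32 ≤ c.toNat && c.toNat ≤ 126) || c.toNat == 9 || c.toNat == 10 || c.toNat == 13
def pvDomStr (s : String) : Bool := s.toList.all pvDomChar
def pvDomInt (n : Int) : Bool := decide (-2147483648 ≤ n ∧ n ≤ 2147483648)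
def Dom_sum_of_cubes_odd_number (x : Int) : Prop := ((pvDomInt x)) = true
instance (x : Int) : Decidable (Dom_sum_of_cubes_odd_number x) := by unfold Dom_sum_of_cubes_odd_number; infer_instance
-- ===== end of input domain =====

-- B replaces A's O(x) loop over odd numbers by the closed form x^2*(2*x^2-1) mod 1e9+7 (faster, asymptotic).


-- ===== PORT A =====
def sum_of_cubes_odd_number (x : Int) : Int :=
  if x = 1 then 1
  else if x = 0 then 0
  else if x < 0 then -1
  else
    let s := (PySem.List.pyRange 1 (2*x-1+1) 2).foldl (fun s i => s + i^3) 0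
    PySem.Int.mod s (10^9+7)

-- ===== PORT B =====
def sum_of_cubes_odd_number_alt (x : Int) : Int :=
  if x < 0 then -1
  else if x = 0 then 0
  else PySem.Int.mod (x * x * (2 * x * x - 1)) (10^9+7)

-- ===== PRECONDITION & SPEC =====
def Spec_sum_of_cubes_odd_number (x : Int) (out : Int) : Prop := out = sum_of_cubes_odd_number_alt x
instance (x : Int) (out : Int) : Decidable (Spec_sum_of_cubes_odd_number x out) := by unfold Spec_sum_of_cubes_odd_number; infer_instance

-- ===== CLAIM (what is proved, stated in full; the proofs are below) =====
def Claim_equal_sum_of_cubes_odd_number : Prop := ∀ (x : Int), Dom_sum_of_cubes_odd_number x → Spec_sum_of_cubes_odd_number x (sum_of_cubes_odd_number x)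

-- ===== LEMMAS AND PROOFS =====

-- sum of cubes of the first n odd numbers equals n^2*(2n^2-1)
theorem pv_sum_cubes_range (n : Nat) :
    ((List.range n).map (fun k : Nat => (1:Int) + 2*(k:Int))).foldl (fun s i => s + i^3) 0
      = (n:Int)^2 * (2*(n:Int)^2 - 1) := by
  induction n with
  | zero => simp
  | succ m ih =>
    rw [List.range_succ, List.map_append, List.foldl_append, ih]
    simp only [List.map_cons, List.map_nil, List.foldl_cons, List.foldl_nil]
    push_cast
    ring

theorem pv_pyRange_odd (n : Nat) :
    PySem.List.pyRange 1 (2*(n:Int)) 2 = (List.range n).map (fun k : Nat => (1:Int) + 2*(k:Int)) := by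
  rw [PySem.List.pyRange_of_pos 1 (2*(n:Int)) (by norm_num)]
  rcases Nat.eq_zero_or_pos n with h | h
  · subst h; simp
  · have : ((1:Int) < 2*(n:Int)) := by omega
    rw [if_pos this]
    have : ((2*(n:Int) - 1 + 2 - 1) / 2).toNat = n := by omega
    rw [this]

-- ===== VERDICT (by name: the statement is the Claim_ definition above) =====
theorem sum_of_cubes_odd_number_spec : Claim_equal_sum_of_cubes_odd_number := by
  intro x _
  unfold Spec_sum_of_cubes_odd_number sum_of_cubes_odd_number sum_of_cubes_odd_number_alt
  by_cases h1 : x = 1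
  · subst h1; decide
  · by_cases h0 : x = 0
    · subst h0; decide
    · by_cases hn : x < 0
      · simp [h1, h0, hn]
      · have hx : 2 ≤ x := by omega
        rw [if_neg h1, if_neg h0, if_neg hn, if_neg hn, if_neg h0]
        obtain ⟨n, rfl⟩ : ∃ n : Nat, x = (n : Int) := ⟨x.toNat, by omega⟩
        have h2x : 2*(n:Int)-1+1 = 2*(n:Int) := by ring
        rw [h2x, pv_pyRange_odd, pv_sum_cubes_range]
        ring_nf
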